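-- pv_equiv track=rewrite | github.com/bottergpt/Tencent2020_Top5 | get_emb/run_w2v.py | get_sep_lst
-- ===== SOURCE A (Python) =====
-- def get_sep_lst(td_lst, sent_cid, threshold=7):
--     """
--     td_lst: list, days to last action
--     sent_cid: corresponding action ID lst
--     threshold: '>=threshold' as the session marker
--     """
--     sep = [0]
--     tmp_sep = []
--     for i, val in enumerate(td_lst):
--         if val >= threshold:
--             xx = sent_cid[sep[-1]:i]
--             if len(xx) > 1:
--                 tmp_sep.append(xx)
--             sep.append(i)
--     xx = sent_cid[sep[-1]:]
--     if len(xx) > 1: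
--         tmp_sep.append(xx)
--     return tmp_sep
-- ===== SOURCE B (Python) =====
-- def get_sep_lst(td_lst, sent_cid, threshold=7):
--     """
--     td_lst: list, days to last action
--     sent_cid: corresponding action ID lst
--     threshold: '>=threshold' as the session marker
--     """
--     out = []
--     cur = []
--     for k, x in enumerate(sent_cid):
--         if k < len(td_lst) and td_lst[k] >= threshold:
--             if len(cur) > 1:
--                 out.append(cur)
--             cur = []
--         cur.append(x)
--     if len(cur) > 1:
--         out.append(cur)
--     return out
-- ===== Notes on version B (the rewrite author's own statement) =====
-- stated objective: alternative
-- what changed: Replaced A's boundary-stack-and-slicing algorithm (collect break positions in 'sep', cut sent_cid by slices sent_cid[sep[-1]:i]) by a single element-wise pass over sent_cid that grows the current session in an accumulator, flushing it whenever the aligned td_lst entry marks a break; no slicing or boundary list at all.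
import Mathlib
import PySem

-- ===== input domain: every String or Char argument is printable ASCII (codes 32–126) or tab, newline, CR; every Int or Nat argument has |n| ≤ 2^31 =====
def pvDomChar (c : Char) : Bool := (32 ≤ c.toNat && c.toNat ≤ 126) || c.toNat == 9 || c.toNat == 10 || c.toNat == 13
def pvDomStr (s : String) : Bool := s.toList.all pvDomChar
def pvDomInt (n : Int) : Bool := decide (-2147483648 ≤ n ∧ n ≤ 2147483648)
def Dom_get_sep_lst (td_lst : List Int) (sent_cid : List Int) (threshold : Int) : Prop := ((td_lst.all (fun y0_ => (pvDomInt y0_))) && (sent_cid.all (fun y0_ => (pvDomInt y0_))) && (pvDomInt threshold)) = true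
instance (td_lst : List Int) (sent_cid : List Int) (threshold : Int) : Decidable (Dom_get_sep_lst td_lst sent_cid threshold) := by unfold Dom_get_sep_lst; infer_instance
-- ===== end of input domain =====

-- B replaces A's slice-based splitting (a growing 'sep' boundary stack, slicing
-- sent_cid between boundaries) by a single element-wise pass over sent_cid that
-- builds each session element by element in an accumulator (objective: alternative).

-- ===== PORT A =====
-- the for-loop of A over enumerate(td_lst), state (sep, tmp_sep)
def getSepLoopA (sc : List Int) (th : Int) :
    List (Int × Int) → List Int × List (List Int) → List Int × List (List Int)
  | [], st => st
  | (i, val) :: rest, (sep, tmp) =>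
      if th ≤ val then
        let xx := PySem.List.slice sc (some (PySem.List.pyGetD sep (-1) 0)) (some i)
        let tmp' := if 1 < xx.length then tmp ++ [xx] else tmp
        getSepLoopA sc th rest (sep ++ [i], tmp')
      else
        getSepLoopA sc th rest (sep, tmp)

def get_sep_lst (td_lst : List Int) (sent_cid : List Int) (threshold : Int) : List (List Int) :=
  let st := getSepLoopA sent_cid threshold (PySem.List.enumerate td_lst 0) ([0], [])
  let xx := PySem.List.slice sent_cid (some (PySem.List.pyGetD st.1 (-1) 0)) none
  if 1 < xx.length then st.2 ++ [xx] else st.2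

-- ===== PORT B =====
-- the for-loop of B over enumerate(sent_cid), state (out, cur);
-- 'k < len(td_lst) and td_lst[k] >= threshold' is the short-circuit guard of Source B
def getSepLoopB (td : List Int) (th : Int) :
    List (Int × Int) → List (List Int) × List Int → List (List Int) × List Int
  | [], st => st
  | (k, x) :: rest, (out, cur) =>
      if decide (k < PySem.List.len td) && decide (th ≤ PySem.List.pyGetD td k 0) then
        let out' := if 1 < cur.length then out ++ [cur] else out
        getSepLoopB td th rest (out', [x])
      else
        getSepLoopB td th rest (out, cur ++ [x])

def get_sep_lst_alt (td_lst : List Int) (sent_cid : List Int) (threshold : Int) : List (List Int) :=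
  let st := getSepLoopB td_lst threshold (PySem.List.enumerate sent_cid 0) ([], [])
  if 1 < st.2.length then st.1 ++ [st.2] else st.1

-- ===== PRECONDITION & SPEC =====
def Spec_get_sep_lst (td_lst : List Int) (sent_cid : List Int) (threshold : Int) (out : List (List Int)) : Prop := out = get_sep_lst_alt td_lst sent_cid threshold
instance (td_lst : List Int) (sent_cid : List Int) (threshold : Int) (out : List (List Int)) : Decidable (Spec_get_sep_lst td_lst sent_cid threshold out) := by unfold Spec_get_sep_lst; infer_instance

-- ===== CLAIM (what is proved, stated in full; the proofs are below) =====
def Claim_equal_get_sep_lst : Prop := ∀ (td_lst : List Int) (sent_cid : List Int) (threshold : Int), Dom_get_sep_lst td_lst sent_cid threshold → Spec_get_sep_lst td_lst sent_cid threshold (get_sep_lst td_lst sent_cid threshold)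

-- ===== LEMMAS AND PROOFS =====

-- common specification: the sessions of the enumerated suffix, current session start s
def segsSpec (sc : List Int) (th : Int) : Int → List (Int × Int) → List (List Int)
  | s, [] =>
      let xx := PySem.List.slice sc (some s) none
      if 1 < xx.length then [xx] else []
  | s, (i, v) :: rest =>
      if th ≤ v then
        (let xx := PySem.List.slice sc (some s) (some i)
         if 1 < xx.length then [xx] else []) ++ segsSpec sc th i rest
      else segsSpec sc th s rest

def finishA (sc : List Int) (st : List Int × List (List Int)) : List (List Int) :=
  let xx := PySem.List.slice sc (some (PySem.List.pyGetD st.1 (-1) 0)) none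
  if 1 < xx.length then st.2 ++ [xx] else st.2

def finishB (st : List (List Int) × List Int) : List (List Int) :=
  if 1 < st.2.length then st.1 ++ [st.2] else st.1

lemma loopA_eq_segs (sc : List Int) (th : Int) :
    ∀ (l : List (Int × Int)) (pre : List Int) (s : Int) (tmp : List (List Int)),
      finishA sc (getSepLoopA sc th l (pre ++ [s], tmp)) = tmp ++ segsSpec sc th s l := by
  intro l
  induction l with
  | nil =>
      intro pre s tmp
      simp [getSepLoopA, finishA, segsSpec, PySem.List.pyGetD_neg_one_append_singleton]
      split <;> simp
  | cons p rest ih =>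
      intro pre s tmp
      obtain ⟨i, v⟩ := p
      by_cases h : th ≤ v
      · simp only [getSepLoopA, h, if_pos, PySem.List.pyGetD_neg_one_append_singleton]
        rw [show (pre ++ [s]) ++ [i] = (pre ++ [s]) ++ [i] from rfl]
        rw [ih (pre ++ [s]) i]
        simp [segsSpec, h]
        split <;> simp
      · simp only [getSepLoopA, h, if_neg, not_false_iff]
        rw [ih pre s]
        simp [segsSpec, h]

-- breaks at or beyond len(sc), start at or beyond len(sc): nothing is emitted
lemma segs_empty (sc : List Int) (th : Int) :
    ∀ (l : List (Int × Int)) (s : Int), (sc.length : Int) ≤ s →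
      (∀ p ∈ l, (sc.length : Int) ≤ p.1) → segsSpec sc th s l = [] := by
  intro l
  induction l with
  | nil =>
      intro s hs _
      have h0 : 0 ≤ s := le_trans (by positivity) hs
      simp [segsSpec, PySem.List.slice_from _ h0]
      omega
  | cons p rest ih =>
      intro s hs hl
      obtain ⟨i, v⟩ := p
      have hi : (sc.length : Int) ≤ i := hl (i, v) (by simp)
      by_cases h : th ≤ v
      · have h0s : 0 ≤ s := le_trans (by positivity) hs
        have h0i : 0 ≤ i := le_trans (by positivity) hi
        simp only [segsSpec, h, if_pos]
        rw [PySem.List.slice_toNat _ h0s h0i,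
            ih i hi (fun q hq => hl q (by simp [hq]))]
        have : sc.drop s.toNat = [] := List.drop_eq_nil_of_le (by omega)
        simp [this]
      · simp only [segsSpec, h, if_neg, not_false_iff]
        exact ih s hs (fun q hq => hl q (by simp [hq]))

-- all breaks at or beyond len(sc): only the final tail segment matters
lemma segs_beyond (sc : List Int) (th : Int) :
    ∀ (l : List (Int × Int)) (s : Nat),
      (∀ p ∈ l, (sc.length : Int) ≤ p.1) →
      segsSpec sc th (s : Int) l =
        (if 1 < (sc.drop s).length then [sc.drop s] else []) := by
  intro l
  induction l with
  | nil =>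
      intro s _
      simp [segsSpec, PySem.List.slice_from_natCast]
  | cons p rest ih =>
      intro s hl
      obtain ⟨i, v⟩ := p
      have hi : (sc.length : Int) ≤ i := hl (i, v) (by simp)
      have h0i : 0 ≤ i := le_trans (by positivity) hi
      by_cases h : th ≤ v
      · simp only [segsSpec, h, if_pos]
        rw [PySem.List.slice_toNat _ (by positivity) h0i]
        have htake : ((sc.drop ((s : Int)).toNat).take (i.toNat - ((s : Int)).toNat)) = sc.drop s := by
          rw [show ((s : Int)).toNat = s from by simp]
          apply List.take_of_length_le
          simp [List.length_drop]
          omega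
        rw [htake, segs_empty sc th rest i hi (fun q hq => hl q (by simp [hq]))]
        simp
      · simp only [segsSpec, h, if_neg, not_false_iff]
        exact ih s (fun q hq => hl q (by simp [hq]))

-- the invariant of B's element-wise loop: cur = sc[s:k], rest = sc[k:]
lemma loopB_inv (td sc : List Int) (th : Int) :
    ∀ (rest : List Int) (k s : Nat) (out : List (List Int)) (cur : List Int),
      s ≤ k → cur = (sc.drop s).take (k - s) → rest = sc.drop k →
      finishB (getSepLoopB td th (PySem.List.enumerate rest (k : Int)) (out, cur))
        = out ++ segsSpec sc th (s : Int) (PySem.List.enumerate (td.drop k) (k : Int)) := by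
  intro rest
  induction rest with
  | nil =>
      intro k s out cur hsk hcur hrest
      have hk : sc.length ≤ k := by
        have := congrArg List.length hrest
        simp [List.length_drop] at this
        omega
      have hcur' : cur = sc.drop s := by
        rw [hcur]
        apply List.take_of_length_le
        simp [List.length_drop]; omega
      have hall : ∀ p ∈ PySem.List.enumerate (td.drop k) (k : Int), (sc.length : Int) ≤ p.1 := by
        intro p hp
        rcases (PySem.List.mem_enumerate_iff _ _ _).1 hp with ⟨j, hj, rfl⟩
        push_cast
        omega
      rw [segs_beyond sc th _ s hall]
      simp [PySem.List.enumerate_nil, getSepLoopB, finishB, hcur']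
      split <;> simp
  | cons x rest' ih =>
      intro k s out cur hsk hcur hrest
      have hk : k < sc.length := by
        by_contra hge
        rw [List.drop_eq_nil_of_le (by omega)] at hrest
        exact absurd hrest (List.cons_ne_nil _ _)
      have hrest' : rest' = sc.drop (k + 1) := by
        rw [← List.tail_drop, ← hrest]
        rfl
      have hx : sc[k] = x := by
        have h1 : (sc.drop k)[0]'(by simp [List.length_drop]; omega) = sc[k] := by
          simp
        rw [← h1]
        simp [← hrest]
      have hcurx : cur ++ [x] = (sc.drop s).take (k + 1 - s) := by
        have hlen : k - s < (sc.drop s).length := by simp [List.length_drop]; omega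
        have hget : (sc.drop s)[k - s]'hlen = x := by
          simp only [List.getElem_drop]
          simp only [show s + (k - s) = k from by omega]
          exact hx
        rw [hcur, show k + 1 - s = (k - s) + 1 by omega, List.take_add_one]
        simp [hget, List.getElem?_eq_getElem hlen]
      rw [PySem.List.enumerate_cons]
      by_cases hktd : k < td.length
      · have hdrop : td.drop k = td[k] :: td.drop (k + 1) :=
          (List.drop_eq_getElem_cons hktd)
        by_cases hv : th ≤ td[k]
        · -- break at k
          simp only [getSepLoopB]
          rw [if_pos (by
            simp [PySem.List.len_eq, PySem.List.pyGetD_natCast, List.getD_eq_getElem?_getD,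
              List.getElem?_eq_getElem hktd]
            constructor
            · exact_mod_cast hktd
            · exact hv)]
          rw [show (k : Int) + 1 = ((k + 1 : Nat) : Int) by push_cast; ring]
          rw [ih (k + 1) k _ [x] (by omega)
            (by
              rw [show k + 1 - k = 1 from by omega, ← hrest]
              rfl)
            hrest']
          rw [hdrop, PySem.List.enumerate_cons,
            show (k : Int) + 1 = ((k + 1 : Nat) : Int) by push_cast; ring]
          simp only [segsSpec, hv, if_pos]
          rw [PySem.List.slice_natCast, ← hcur]
          split <;> simp
        · -- td[k] below threshold
          simp only [getSepLoopB]
          rw [if_neg (by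
            simp [PySem.List.len_eq, PySem.List.pyGetD_natCast, List.getD_eq_getElem?_getD,
              List.getElem?_eq_getElem hktd]
            intro _
            omega)]
          rw [show (k : Int) + 1 = ((k + 1 : Nat) : Int) by push_cast; ring]
          rw [ih (k + 1) s _ (cur ++ [x]) (by omega) hcurx hrest']
          rw [hdrop, PySem.List.enumerate_cons,
            show (k : Int) + 1 = ((k + 1 : Nat) : Int) by push_cast; ring]
          simp only [segsSpec, hv, if_neg, not_false_iff]
      · -- k beyond td: no break possible any more
        simp only [getSepLoopB]
        rw [if_neg (by
          simp [PySem.List.len_eq]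
          intro h
          exact absurd (by exact_mod_cast h) hktd)]
        rw [show (k : Int) + 1 = ((k + 1 : Nat) : Int) by push_cast; ring]
        rw [ih (k + 1) s _ (cur ++ [x]) (by omega) hcurx hrest']
        rw [List.drop_eq_nil_of_le (by omega : td.length ≤ k),
            List.drop_eq_nil_of_le (by omega : td.length ≤ k + 1)]
        simp [PySem.List.enumerate_nil]

-- ===== VERDICT (by name: the statement is the Claim_ definition above) =====
theorem get_sep_lst_spec : Claim_equal_get_sep_lst := by
  intro td sc th _
  unfold Spec_get_sep_lst get_sep_lst get_sep_lst_alt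
  have hA := loopA_eq_segs sc th (PySem.List.enumerate td 0) [] 0 []
  have hB := loopB_inv td sc th sc 0 0 [] [] le_rfl (by simp) (by simp)
  simp only [List.nil_append, List.drop_zero, Nat.cast_zero] at hA hB
  simp only [finishA] at hA
  simp only [finishB] at hB
  rw [hB]
  exact hA
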